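-- pv_equiv track=rewrite | github.com/solo21-12/A2SV_Progress | bottom_up_challange/C_Vacation.py | solve
-- ===== SOURCE A (Python) =====
-- def solve(grid, n):
--     prev = grid[-1]
--
--     for i in range(n - 2, -1, -1):
--         cur = [0 for _ in range(3)]
--
--         for j in range(3):
--
--             minn = 0
--
--             for k in range(3):
--
--                 if k != j:
--                     temp = grid[i][j] + prev[k]
--                     minn = max(minn, temp)
--
--             cur[j] = minn
--
--         prev = cur
--
--     return max(prev)
-- ===== SOURCE B (Python) =====
-- def solve(grid, n):
--     prev = grid[-1]
--     if n <= 1: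
--         return max(prev)
--     for i in range(n - 2, -1, -1):
--         a, b, c = prev[0], prev[1], prev[2]
--         if a >= b:
--             m1, m2, arg = a, b, 0
--         else:
--             m1, m2, arg = b, a, 1
--         if c > m1:
--             m1, m2, arg = c, m1, 2
--         elif c > m2:
--             m2 = c
--         row = grid[i]
--         prev = [max(0, row[j] + (m2 if j == arg else m1)) for j in range(3)]
--     return max(prev)
-- ===== Notes on version B (the rewrite author's own statement) =====
-- stated objective: alternative
-- what changed: Replaces A's inner max-over-k!=j rescan (3x3 per row) with a single pass that keeps the top-two values and the argmax of the previous row, computing each new entry in O(1); returns early for n<=1 instead of running an empty loop.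
import Mathlib
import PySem

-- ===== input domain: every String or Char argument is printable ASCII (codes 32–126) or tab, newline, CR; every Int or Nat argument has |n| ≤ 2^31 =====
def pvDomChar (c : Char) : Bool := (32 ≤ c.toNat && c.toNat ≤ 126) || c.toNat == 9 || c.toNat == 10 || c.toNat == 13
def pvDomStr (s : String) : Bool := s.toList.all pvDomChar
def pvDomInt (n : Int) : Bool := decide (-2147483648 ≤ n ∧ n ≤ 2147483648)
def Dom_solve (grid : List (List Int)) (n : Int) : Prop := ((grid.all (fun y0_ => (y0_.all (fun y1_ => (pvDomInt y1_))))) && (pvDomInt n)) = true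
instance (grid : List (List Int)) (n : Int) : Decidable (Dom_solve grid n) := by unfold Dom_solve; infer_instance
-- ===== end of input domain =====

-- B replaces A's inner 3×3 rescan per row with one pass keeping the top-two values (and argmax)
-- of the previous row; constant-factor restructuring, same O(n) rows. Return-value equivalence only.

-- ===== PORT A =====
-- inner body of A's row loop: cur = [0,0,0]; for j: minn = max over k≠j; cur[j] = minn
def solveStepA (grid : List (List Int)) (prev : List Int) (i : Int) : List Int :=
  let cur := (PySem.List.pyRange 0 3 1).map (fun _ => (0 : Int))
  (PySem.List.pyRange 0 3 1).foldl (fun cur j =>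
    let minn := (PySem.List.pyRange 0 3 1).foldl (fun minn k =>
      if k ≠ j then
        let temp := PySem.List.pyGetD (PySem.List.pyGetD grid i []) j 0 + PySem.List.pyGetD prev k 0
        max minn temp
      else minn) 0
    PySem.List.pySetD cur j minn) cur

def solve (grid : List (List Int)) (n : Int) : Int :=
  let prev := PySem.List.pyGetD grid (-1) []
  let prev := (PySem.List.pyRange (n - 2) (-1) (-1)).foldl (fun prev i => solveStepA grid prev i) prev
  (PySem.List.max? prev (fun x => x)).getD 0

-- ===== PORT B =====
-- B's row body: top-two (m1, m2) and argmax of prev[0..2], then each entry in O(1)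
def solveStepB (grid : List (List Int)) (prev : List Int) (i : Int) : List Int :=
  let a := PySem.List.pyGetD prev 0 0
  let b := PySem.List.pyGetD prev 1 0
  let c := PySem.List.pyGetD prev 2 0
  -- simultaneous tuple assignments written variable-wise
  let m1 : Int := if a ≥ b then a else b
  let m2 : Int := if a ≥ b then b else a
  let arg : Int := if a ≥ b then 0 else 1
  let m1' : Int := if c > m1 then c else m1
  let m2' : Int := if c > m1 then m1 else if c > m2 then c else m2
  let arg' : Int := if c > m1 then 2 else arg
  let row := PySem.List.pyGetD grid i []
  (PySem.List.pyRange 0 3 1).map (fun j =>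
    max 0 (PySem.List.pyGetD row j 0 + (if j = arg' then m2' else m1')))

def solve_alt (grid : List (List Int)) (n : Int) : Int :=
  let prev := PySem.List.pyGetD grid (-1) []
  if n ≤ 1 then (PySem.List.max? prev (fun x => x)).getD 0
  else
    let prev := (PySem.List.pyRange (n - 2) (-1) (-1)).foldl (fun prev i => solveStepB grid prev i) prev
    (PySem.List.max? prev (fun x => x)).getD 0

-- ===== PRECONDITION & SPEC =====
-- Pre_ excludes exactly the inputs where A raises: empty grid (grid[-1] IndexError); for n ≥ 2,
-- a missing row i ≤ n-2 or a row among them (or the last row) shorter than 3 (IndexError);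
-- for n ≤ 1, an empty last row (max([]) ValueError).
def Pre_solve (grid : List (List Int)) (n : Int) : Prop :=
  grid ≠ [] ∧
  (if 2 ≤ n then
      (n - 1).toNat ≤ grid.length ∧
      (∀ i ∈ List.range (n - 1).toNat, 3 ≤ (grid.getD i []).length) ∧
      3 ≤ (grid.getLast?.getD []).length
    else (grid.getLast?.getD []) ≠ [])
instance (grid : List (List Int)) (n : Int) : Decidable (Pre_solve grid n) := by
  unfold Pre_solve; infer_instance

def pvWitness_solve : List (List Int) × Int := ([[1, 2, 3], [4, -5, 6]], 2)

def Spec_solve (grid : List (List Int)) (n : Int) (out : Int) : Prop := out = solve_alt grid n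
instance (grid : List (List Int)) (n : Int) (out : Int) : Decidable (Spec_solve grid n out) := by unfold Spec_solve; infer_instance

-- ===== CLAIM (what is proved, stated in full; the proofs are below) =====
def Claim_equal_solve : Prop := ∀ (grid : List (List Int)) (n : Int), Dom_solve grid n → Pre_solve grid n → Spec_solve grid n (solve grid n)

-- ===== LEMMAS AND PROOFS =====
-- the two row bodies agree on every state (the top-two trick equals the k-rescan)
theorem stepA_eq_stepB (grid : List (List Int)) (prev : List Int) (i : Int) :
    solveStepA grid prev i = solveStepB grid prev i := by
  unfold solveStepA solveStepB
  simp only [show PySem.List.pyRange 0 3 1 = [0, 1, 2] from by decide,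
    List.foldl_cons, List.foldl_nil, List.map_cons, List.map_nil]
  generalize PySem.List.pyGetD grid i [] = row
  generalize PySem.List.pyGetD prev 0 0 = a
  generalize PySem.List.pyGetD prev 1 0 = b
  generalize PySem.List.pyGetD prev 2 0 = c
  generalize PySem.List.pyGetD row 0 0 = g0
  generalize PySem.List.pyGetD row 1 0 = g1
  generalize PySem.List.pyGetD row 2 0 = g2
  norm_num [PySem.List.pySetD, PySem.List.pySet?, PySem.List.pyIdx?, List.set]
  simp only [show (2:Int).toNat = 2 from rfl, List.set, List.cons.injEq, and_true]
  split_ifs <;> refine ⟨?_, ?_, ?_⟩ <;> omega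

theorem solve_eq_alt (grid : List (List Int)) (n : Int) : solve grid n = solve_alt grid n := by
  unfold solve solve_alt
  by_cases h : n ≤ 1
  · rw [if_pos h, PySem.List.pyRange_neg_one_eq_nil (by omega)]
    simp [List.foldl_nil]
  · rw [if_neg h]
    simp only [stepA_eq_stepB]

-- ===== VERDICT (by name: the statement is the Claim_ definition above) =====
theorem solve_spec : Claim_equal_solve := by
  intro grid n _ _
  unfold Spec_solve
  exact solve_eq_alt grid n
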